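-- pv_equiv track=rewrite | github.com/jeffrelt/RandomGoodness | python/reverseBut.py | reverseBut
-- ===== SOURCE A (Python) =====
-- def reverseBut(s, but_these):
--     s = list(s)
--     low = 0
--     high = len(s)-1
--     while low < high:
--         if s[low] in but_these:
--             low+=1
--         elif s[high] in but_these:
--             high-=1
--         else:
--             s[low], s[high] = s[high], s[low]
--             low+=1
--             high-=1
--     return ''.join(s)
-- ===== SOURCE B (Python) =====
-- def reverseBut(s, but_these):
--     movable = [c for c in s if c not in but_these]
--     out = []
--     i = len(movable)
--     for c in s:
--         if c in but_these:
--             out.append(c)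
--         else:
--             i -= 1
--             out.append(movable[i])
--     return ''.join(out)
-- ===== Notes on version B (the rewrite author's own statement) =====
-- stated objective: alternative
-- what changed: Replaces A's converging in-place two-pointer swap loop with a filter-reverse-reinterleave decomposition: one pass collects the movable (non-excluded) characters, a second left-to-right pass emits excluded characters in place and consumes the movable list from its end.
import Mathlib
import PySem

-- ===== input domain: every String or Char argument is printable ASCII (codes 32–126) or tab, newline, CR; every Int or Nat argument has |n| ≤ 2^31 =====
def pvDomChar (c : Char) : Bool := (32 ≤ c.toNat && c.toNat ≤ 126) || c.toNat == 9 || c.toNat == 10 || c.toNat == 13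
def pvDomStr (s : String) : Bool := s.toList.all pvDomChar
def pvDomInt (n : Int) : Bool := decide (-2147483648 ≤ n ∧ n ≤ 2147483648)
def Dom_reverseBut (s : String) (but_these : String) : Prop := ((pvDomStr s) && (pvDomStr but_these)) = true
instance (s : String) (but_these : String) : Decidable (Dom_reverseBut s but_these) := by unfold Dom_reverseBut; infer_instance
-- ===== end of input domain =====

-- B replaces A's converging in-place two-pointer swap with a filter + back-to-front
-- reinterleave pass (objective: alternative decomposition, similar cost).
-- Python's `c in but_these` on a single char is char membership: ported as List.contains.

-- ===== PORT A =====
-- A's while loop over (low, high) pointers; indices are always in range when read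
-- (0 ≤ low < high < len), so the Nat model with getD/set is exact.
def loopA (but : List Char) (arr : List Char) (low high : Nat) : List Char :=
  if h : low < high then
    if but.contains (arr.getD low ' ') then
      loopA but arr (low + 1) high
    else if but.contains (arr.getD high ' ') then
      loopA but arr low (high - 1)
    else
      loopA but ((arr.set low (arr.getD high ' ')).set high (arr.getD low ' '))
        (low + 1) (high - 1)
  else arr
termination_by high - low
decreasing_by all_goals omega

def reverseBut (s : String) (but_these : String) : String :=
  String.ofList (loopA but_these.toList s.toList 0 (s.toList.length - 1))

-- ===== PORT B =====
-- Source B's single left-to-right pass, consuming movable[i] with i counting down;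
-- i is always ≥ 1 when decremented (counts match), so the Nat model with getD is exact.
def interB (but : List Char) (xs : List Char) (mov : List Char) (i : Nat) : List Char :=
  match xs with
  | [] => []
  | c :: r =>
    if but.contains c then c :: interB but r mov i
    else mov.getD (i - 1) ' ' :: interB but r mov (i - 1)

def reverseBut_alt (s : String) (but_these : String) : String :=
  let mov := s.toList.filter (fun c => !(but_these.toList.contains c))
  String.ofList (interB but_these.toList s.toList mov mov.length)

-- ===== PRECONDITION & SPEC =====
def Spec_reverseBut (s : String) (but_these : String) (out : String) : Prop := out = reverseBut_alt s but_these
instance (s : String) (but_these : String) (out : String) : Decidable (Spec_reverseBut s but_these out) := by unfold Spec_reverseBut; infer_instance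

-- ===== CLAIM (what is proved, stated in full; the proofs are below) =====
def Claim_equal_reverseBut : Prop := ∀ (s : String) (but_these : String), Dom_reverseBut s but_these → Spec_reverseBut s but_these (reverseBut s but_these)

-- ===== LEMMAS AND PROOFS =====

-- Recursive characterisation of A's two-pointer loop on the active segment.
def recf (but : List Char) : List Char → List Char
  | [] => []
  | [c] => [c]
  | c :: d0 :: t' =>
    if but.contains c then c :: recf but (d0 :: t')
    else if but.contains ((d0 :: t').getLastD ' ') then
      recf but (c :: (d0 :: t').dropLast) ++ [(d0 :: t').getLastD ' ']
    else (d0 :: t').getLastD ' ' :: recf but (d0 :: t').dropLast ++ [c]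
termination_by xs => xs.length
decreasing_by all_goals simp [List.length_dropLast]

-- interleave: movable chars of xs replaced front-to-back by ms.
def inter (but : List Char) : List Char → List Char → List Char
  | [], _ => []
  | c :: r, ms =>
    if but.contains c then c :: inter but r ms
    else ms.headD ' ' :: inter but r ms.tail

lemma inter_nil (but ms : List Char) : inter but [] ms = [] := rfl

lemma inter_cons_kept (but : List Char) (c : Char) (r ms : List Char)
    (h : but.contains c = true) : inter but (c :: r) ms = c :: inter but r ms := by
  rw [inter, if_pos h]

lemma inter_cons_mov (but : List Char) (c : Char) (r ms : List Char)
    (h : ¬ but.contains c = true) :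
    inter but (c :: r) ms = ms.headD ' ' :: inter but r ms.tail := by
  rw [inter, if_neg h]

lemma getD_append_len (xs : List Char) (y : Char) (zs : List Char) (d : Char) :
    (xs ++ y :: zs).getD xs.length d = y := by
  induction xs with
  | nil => rfl
  | cons a as ih => simp

lemma set_append_len (xs : List Char) (y v : Char) (zs : List Char) :
    (xs ++ y :: zs).set xs.length v = xs ++ v :: zs := by
  induction xs with
  | nil => rfl
  | cons a as ih => simp [ih]

lemma getLastD_concat' (l : List Char) (d e : Char) : (l ++ [d]).getLastD e = d := by
  induction l generalizing e with
  | nil => rfl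
  | cons x l ih =>
    rw [List.cons_append, List.getLastD_cons]
    exact ih x

lemma recf_concat (but : List Char) (c d : Char) (m : List Char) :
    recf but (c :: (m ++ [d])) =
      if but.contains c then c :: recf but (m ++ [d])
      else if but.contains d then recf but (c :: m) ++ [d]
      else d :: recf but m ++ [c] := by
  cases m with
  | nil => simp [recf]
  | cons a as =>
    show recf but (c :: a :: (as ++ [d])) = _
    rw [recf]
    have h1 : (a :: (as ++ [d])).getLastD ' ' = d := by
      simpa using getLastD_concat' (a :: as) d ' ' 
    have h2 : (a :: (as ++ [d])).dropLast = a :: as := by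
      rw [show a :: (as ++ [d]) = (a :: as) ++ [d] by simp]
      exact List.dropLast_concat
    rw [h1, h2]
    rfl

lemma loopA_eq (but : List Char) :
    ∀ (n : Nat) (pre mid post : List Char), mid.length ≤ n → mid ≠ [] →
      loopA but (pre ++ mid ++ post) pre.length (pre.length + mid.length - 1) =
        pre ++ recf but mid ++ post := by
  intro n
  induction n with
  | zero => intro pre mid post hlen hne; cases mid <;> simp_all
  | succ n ih =>
    intro pre mid post hlen hne
    match mid, hne with
    | [c], _ =>
      rw [loopA, dif_neg (by simp)]
      simp [recf]
    | c :: d0 :: t', _ =>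
      obtain ⟨m, d, hmd⟩ : ∃ m d, d0 :: t' = m ++ [d] := by
        rcases List.eq_nil_or_concat (d0 :: t') with h | ⟨m, d, h⟩
        · simp at h
        · exact ⟨m, d, by simpa using h⟩
      rw [hmd]
      rw [hmd] at hlen
      have hlm : m.length + 2 ≤ n + 1 := by simpa using hlen
      have e1 : (pre ++ (c :: (m ++ [d])) ++ post).getD pre.length ' ' = c := by
        have := getD_append_len pre c ((m ++ [d]) ++ post) ' '
        simpa using this
      have harr2 : pre ++ (c :: (m ++ [d])) ++ post = (pre ++ c :: m) ++ d :: post := by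
        simp
      have hlen2 : (pre ++ c :: m).length = pre.length + (c :: (m ++ [d])).length - 1 := by
        simp <;> omega
      have e2 : (pre ++ (c :: (m ++ [d])) ++ post).getD (pre.length + (c :: (m ++ [d])).length - 1) ' ' = d := by
        rw [harr2, ← hlen2]
        exact getD_append_len (pre ++ c :: m) d post ' '
      rw [loopA, dif_pos (by simp <;> omega), e1, e2]
      by_cases hc : but.contains c = true
      · rw [if_pos hc]
        have h1 : pre ++ (c :: (m ++ [d])) ++ post = (pre ++ [c]) ++ (m ++ [d]) ++ post := by simp
        have h2 : pre.length + (c :: (m ++ [d])).length - 1 = (pre ++ [c]).length + (m ++ [d]).length - 1 := by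
          simp <;> omega
        have h3 : pre.length + 1 = (pre ++ [c]).length := by simp
        rw [h1, h2, h3, ih (pre ++ [c]) (m ++ [d]) post (by simp <;> omega) (by simp)]
        rw [recf_concat, if_pos hc]
        simp
      · rw [if_neg hc]
        by_cases hd : but.contains d = true
        · rw [if_pos hd]
          have h1 : pre ++ (c :: (m ++ [d])) ++ post = pre ++ (c :: m) ++ ([d] ++ post) := by simp
          have h2 : pre.length + (c :: (m ++ [d])).length - 1 - 1 = pre.length + (c :: m).length - 1 := by
            simp <;> omega
          rw [h1, h2, ih pre (c :: m) ([d] ++ post) (by simp <;> omega) (by simp)]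
          rw [recf_concat, if_neg hc, if_pos hd]
          simp
        · rw [if_neg hd]
          have s1 : (pre ++ (c :: (m ++ [d])) ++ post).set pre.length d = pre ++ d :: ((m ++ [d]) ++ post) := by
            have := set_append_len pre c d ((m ++ [d]) ++ post)
            simpa using this
          have s2 : (pre ++ d :: ((m ++ [d]) ++ post)).set (pre.length + (c :: (m ++ [d])).length - 1) c
              = (pre ++ d :: m) ++ c :: post := by
            have hform : pre ++ d :: ((m ++ [d]) ++ post) = (pre ++ d :: m) ++ d :: post := by simp
            have hlen3 : (pre ++ d :: m).length = pre.length + (c :: (m ++ [d])).length - 1 := by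
              simp <;> omega
            rw [hform, ← hlen3]
            exact set_append_len (pre ++ d :: m) d c post
          rw [s1, s2]
          rw [recf_concat, if_neg hc, if_neg hd]
          cases m with
          | nil =>
            rw [loopA, dif_neg (by simp)]
            simp [recf]
          | cons a m' =>
            have h1 : (pre ++ d :: (a :: m')) ++ c :: post = (pre ++ [d]) ++ (a :: m') ++ (c :: post) := by simp
            have h2 : pre.length + (c :: ((a :: m') ++ [d])).length - 1 - 1 = (pre ++ [d]).length + (a :: m').length - 1 := by
              simp <;> omega
            have h3 : pre.length + 1 = (pre ++ [d]).length := by simp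
            rw [h1, h2, h3, ih (pre ++ [d]) (a :: m') (c :: post) (by have h4 := hlm; simp at h4 ⊢ <;> omega) (by simp)]
            simp

lemma inter_split (but : List Char) :
    ∀ (ys zs m1 m2 : List Char),
      (ys.filter (fun c => !(but.contains c))).length = m1.length →
      inter but (ys ++ zs) (m1 ++ m2) = inter but ys m1 ++ inter but zs m2 := by
  intro ys
  induction ys with
  | nil =>
    intro zs m1 m2 h
    simp at h
    obtain rfl : m1 = [] := by cases m1 <;> simp_all
    simp [inter]
  | cons y ys ih =>
    intro zs m1 m2 h
    rw [List.filter_cons] at h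
    by_cases hy : but.contains y = true
    · rw [hy] at h
      simp only [Bool.not_true, Bool.false_eq_true, if_false] at h
      show inter but (y :: (ys ++ zs)) (m1 ++ m2) = inter but (y :: ys) m1 ++ inter but zs m2
      rw [inter, inter, hy]
      simp [ih zs m1 m2 h]
    · rw [Bool.not_eq_true] at hy
      rw [hy] at h
      simp only [Bool.not_false, if_true, List.length_cons] at h
      cases m1 with
      | nil => simp at h
      | cons b m1' =>
        simp only [List.length_cons, Nat.add_right_cancel_iff] at h
        show inter but (y :: (ys ++ zs)) ((b :: m1') ++ m2) = inter but (y :: ys) (b :: m1') ++ inter but zs m2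
        rw [inter, inter, hy]
        simp [ih zs m1' m2 h]

lemma recf_eq_inter (but : List Char) :
    ∀ (n : Nat) (xs : List Char), xs.length ≤ n →
      recf but xs = inter but xs ((xs.filter (fun c => !(but.contains c))).reverse) := by
  intro n
  induction n with
  | zero =>
    intro xs h
    cases xs <;> simp_all [recf, inter]
  | succ n ih =>
    intro xs hlen
    match xs with
    | [] => simp [recf, inter]
    | [c] =>
      rw [List.filter_cons]
      by_cases hc : but.contains c = true
      · rw [show recf but [c] = [c] from by simp [recf], hc]
        simp only [Bool.not_true, Bool.false_eq_true, if_false, List.filter_nil,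
          List.reverse_nil]
        rw [inter_cons_kept but c [] [] hc, inter_nil]
      · rw [show recf but [c] = [c] from by simp [recf]]
        rw [Bool.not_eq_true] at hc
        rw [hc]
        simp only [Bool.not_false, if_true, List.filter_nil, List.reverse_cons,
          List.reverse_nil, List.nil_append]
        rw [inter_cons_mov but c [] [c] (by rw [Bool.not_eq_true]; exact hc), inter_nil]
        rfl
    | c :: d0 :: t' =>
      obtain ⟨m, d, hmd⟩ : ∃ m d, d0 :: t' = m ++ [d] := by
        rcases List.eq_nil_or_concat (d0 :: t') with h | ⟨m, d, h⟩
        · simp at h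
        · exact ⟨m, d, by simpa using h⟩
      rw [hmd]
      rw [hmd] at hlen
      have hlm : m.length + 2 ≤ n + 1 := by simpa using hlen
      rw [recf_concat]
      by_cases hc : but.contains c = true
      · rw [if_pos hc]
        have hf : List.filter (fun x => !but.contains x) (c :: (m ++ [d]))
            = List.filter (fun x => !but.contains x) (m ++ [d]) := by
          rw [List.filter_cons, hc]
          simp only [Bool.not_true, Bool.false_eq_true, if_false]
        rw [hf, inter_cons_kept but c (m ++ [d]) _ hc]
        rw [ih (m ++ [d]) (by simp <;> omega)]
      · rw [if_neg hc]
        have hc' : but.contains c = false := by rwa [Bool.not_eq_true] at hc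
        by_cases hd : but.contains d = true
        · rw [if_pos hd]
          have hf : List.filter (fun x => !but.contains x) (c :: (m ++ [d]))
              = List.filter (fun x => !but.contains x) (c :: m) := by
            rw [List.filter_cons, List.filter_cons, List.filter_append, List.filter_cons,
              hc', hd]
            simp only [Bool.not_false, Bool.not_true, if_true, Bool.false_eq_true, if_false,
              List.filter_nil, List.append_nil]
          rw [hf]
          have hsplit := inter_split but (c :: m) [d]
            ((List.filter (fun x => !but.contains x) (c :: m)).reverse) []
            (by simp)
          rw [show c :: (m ++ [d]) = (c :: m) ++ [d] by simp,
              show ((List.filter (fun x => !but.contains x) (c :: m)).reverse)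
                = ((List.filter (fun x => !but.contains x) (c :: m)).reverse) ++ [] by simp,
              hsplit]
          rw [inter_cons_kept but d [] [] hd, inter_nil]
          rw [ih (c :: m) (by simp <;> omega)]
        · rw [if_neg hd]
          have hf : List.filter (fun x => !but.contains x) (c :: (m ++ [d]))
              = c :: (List.filter (fun x => !but.contains x) m ++ [d]) := by
            rw [List.filter_cons, List.filter_append, List.filter_cons, hc',
              show but.contains d = false by rwa [Bool.not_eq_true] at hd]
            simp only [Bool.not_false, if_true, List.filter_nil]
          rw [hf]
          have hrev : (c :: (List.filter (fun x => !but.contains x) m ++ [d])).reverse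
              = d :: ((List.filter (fun x => !but.contains x) m).reverse ++ [c]) := by simp
          rw [hrev]
          rw [inter_cons_mov but c (m ++ [d]) _ hc]
          simp only [List.headD_cons, List.tail_cons]
          have hsplit := inter_split but m [d]
            ((List.filter (fun x => !but.contains x) m).reverse) [c] (by simp)
          rw [hsplit]
          rw [inter_cons_mov but d [] [c] hd, inter_nil]
          simp only [List.headD_cons, List.tail_cons]
          rw [ih m (by omega)]
          simp

lemma interB_eq_inter (but : List Char) :
    ∀ (xs : List Char) (mov : List Char) (i : Nat),
      (xs.filter (fun c => !(but.contains c))).length ≤ i → i ≤ mov.length →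
      interB but xs mov i = inter but xs ((mov.take i).reverse) := by
  intro xs
  induction xs with
  | nil => intro mov i _ _; simp [interB, inter]
  | cons c r ihx =>
    intro mov i h1 h2
    rw [List.filter_cons] at h1
    by_cases hc : but.contains c = true
    · rw [hc] at h1
      simp only [Bool.not_true, Bool.false_eq_true, if_false] at h1
      rw [interB, if_pos hc, inter_cons_kept but c r _ hc, ihx mov i h1 h2]
    · rw [Bool.not_eq_true] at hc
      rw [hc] at h1
      simp only [Bool.not_false, if_true, List.length_cons] at h1
      have hi1 : 1 ≤ i := by omega
      have hstep : (mov.take i).reverse = mov.getD (i - 1) ' ' :: (mov.take (i - 1)).reverse := by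
        obtain ⟨j, rfl⟩ : ∃ j, i = j + 1 := ⟨i - 1, by omega⟩
        have hj : j < mov.length := by omega
        rw [List.take_succ, List.getElem?_eq_getElem hj]
        simp [List.getD, List.getElem?_eq_getElem hj]
      rw [interB, if_neg (by rw [Bool.not_eq_true]; exact hc), inter_cons_mov but c r _ (by rw [Bool.not_eq_true]; exact hc), hstep]
      simp only [List.headD_cons, List.tail_cons]
      rw [ihx mov (i - 1) (by omega) (by omega)]

-- ===== VERDICT (by name: the statement is the Claim_ definition above) =====
theorem reverseBut_spec : Claim_equal_reverseBut := by
  intro s but_these _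
  unfold Spec_reverseBut reverseBut reverseBut_alt
  cases harr : s.toList with
  | nil => simp [loopA, interB]
  | cons a as =>
    have hA := loopA_eq but_these.toList (a :: as).length [] (a :: as) [] (le_refl _) (by simp)
    simp only [List.nil_append, List.append_nil, List.length_nil, Nat.zero_add] at hA
    rw [hA]
    simp only []
    have hB := interB_eq_inter but_these.toList (a :: as)
      ((a :: as).filter (fun c => !(but_these.toList.contains c)))
      ((a :: as).filter (fun c => !(but_these.toList.contains c))).length
      (le_refl _) (le_refl _)
    rw [hB, List.take_length]
    rw [recf_eq_inter but_these.toList (a :: as).length (a :: as) (le_refl _)]
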